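-- pv_equiv track=rewrite | github.com/flycatcher/relue-tcejorp | p351/src/solution.py | primitives
-- ===== SOURCE A (Python) =====
-- def binary_search(m, s):
--     """
--     Find the smallest n such that floor(m / n) < s
--     """
--     if s <= 1:
--         return m + 1
--     upper, lower = m, 2
--     while True:
--         n = (upper + lower) >> 1
--         t = m // n
--         if t < s and m // (n - 1) == s:
--             return n
--         elif t >= s:
--             lower = n
--         elif t <= s - 1:
--             upper = n
--
-- def primitives(p, sp):
--     """
--     Calculates the number of primitive lattices enclosed within a right triangle
--     defined by (0, 0), (p, 0) and (0, p)
--     """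
--     if p in sp:
--         return sp[p]
--     result = (p * (p + 1)) >> 1
--     d = 2
--     while d <= p:
--         s = p // d
--         dn = binary_search(p, s)
--         result -= primitives(s, sp) * (dn - d)
--         d = dn
--     sp.setdefault(p, result)
--     return result
-- ===== SOURCE B (Python) =====
-- def primitives(p, sp):
--     """
--     Calculates the number of primitive lattices enclosed within a right triangle
--     defined by (0, 0), (p, 0) and (0, p)
--     """
--     if p in sp:
--         return sp[p]
--     result = p * (p + 1) // 2
--     for d in range(2, p + 1):
--         result -= primitives(p // d, sp)
--     sp.setdefault(p, result)
--     return result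
-- ===== Notes on version B (the rewrite author's own statement) =====
-- stated objective: simpler
-- what changed: B drops the hyperbola divisor-block grouping and the hand-written binary_search bisection entirely: instead of finding each constancy block of p//d by binary search and subtracting primitives(p//d)*(block length) once per block, B subtracts primitives(p//d, sp) in one flat loop over every d in range(2, p+1); the shared memo dict sp makes the repeated calls inside a block memo hits, so the value, and the mutation of sp (same keys, same values, same insertion order), are identical.
import Mathlib
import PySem

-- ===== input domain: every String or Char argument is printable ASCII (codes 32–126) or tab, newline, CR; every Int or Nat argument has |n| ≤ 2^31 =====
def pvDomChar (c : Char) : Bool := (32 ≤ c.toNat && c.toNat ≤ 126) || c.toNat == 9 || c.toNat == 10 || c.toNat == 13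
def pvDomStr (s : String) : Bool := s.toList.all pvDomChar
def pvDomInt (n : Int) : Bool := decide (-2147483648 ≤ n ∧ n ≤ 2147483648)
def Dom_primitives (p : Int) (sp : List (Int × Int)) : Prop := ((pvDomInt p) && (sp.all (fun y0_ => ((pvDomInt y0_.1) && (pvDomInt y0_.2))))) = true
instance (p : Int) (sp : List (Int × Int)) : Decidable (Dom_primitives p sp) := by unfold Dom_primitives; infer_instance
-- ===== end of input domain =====

-- B replaces A's hyperbola-block scan with binary_search by one flat loop over every divisor
-- (objective: simpler). Equivalence is about the RETURN value; Python A also mutates sp and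
-- B performs the identical mutation (same keys, same values, same order).

-- ===== PORT A =====
-- `x >> 1` on Python ints is floor division by 2: ported as PySem.Int.floordiv x 2 (exact).
-- The `while True` loop of binary_search is ported with fuel (0 on exhaustion); the lemmas
-- below prove the fuel is never exhausted on the calls primitives makes.
def bsLoop (m s : Int) : Nat → Int → Int → Int
  | 0, _, _ => 0
  | fuel+1, upper, lower =>
    let n := PySem.Int.floordiv (upper + lower) 2
    let t := PySem.Int.floordiv m n
    if t < s ∧ PySem.Int.floordiv m (n - 1) = s then n
    else if s ≤ t then bsLoop m s fuel upper n
    else if t ≤ s - 1 then bsLoop m s fuel n lower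
    else bsLoop m s fuel upper lower   -- unreachable: t < s implies t ≤ s - 1

def binary_search (m s : Int) : Int :=
  if s ≤ 1 then m + 1 else bsLoop m s (m + 2).toNat m 2

-- the `while d <= p` loop of A, fuel-ported; `rec` is the recursive call primitives(s, sp)
def whileA (rec : Int → PySem.Dict Int Int → Int × PySem.Dict Int Int) (p : Int) :
    Nat → Int → Int → PySem.Dict Int Int → Int × PySem.Dict Int Int
  | 0, _, result, sp => (result, sp)
  | w+1, d, result, sp =>
    if d ≤ p then
      let s := PySem.Int.floordiv p d
      let dn := binary_search p s
      let r := rec s sp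
      whileA rec p w dn (result - r.1 * (dn - d)) r.2
    else (result, sp)

-- A's recursion with the mutated dict sp threaded explicitly; fuel bounds the recursion depth
def goA : Nat → Int → PySem.Dict Int Int → Int × PySem.Dict Int Int
  | 0, _, sp => (0, sp)
  | fuel+1, p, sp =>
    match sp.get? p with
    | some v => (v, sp)
    | none =>
      let r := whileA (goA fuel) p (p.toNat + 1) 2 (PySem.Int.floordiv (p * (p + 1)) 2) sp
      (r.1, r.2.setdefault p r.1)

def primitives (p : Int) (sp : List (Int × Int)) : Int :=
  (goA (p.toNat + 1) p (PySem.Dict.mk sp)).1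

-- ===== PORT B =====
-- the body of B's `for d in range(2, p+1)` loop; `rec` is the recursive call primitives(p//d, sp)
def stepB (rec : Int → PySem.Dict Int Int → Int × PySem.Dict Int Int) (p : Int)
    (acc : Int × PySem.Dict Int Int) (d : Int) : Int × PySem.Dict Int Int :=
  let r := rec (PySem.Int.floordiv p d) acc.2
  (acc.1 - r.1, r.2)

def goB : Nat → Int → PySem.Dict Int Int → Int × PySem.Dict Int Int
  | 0, _, sp => (0, sp)
  | fuel+1, p, sp =>
    match sp.get? p with
    | some v => (v, sp)
    | none =>
      let r := (PySem.List.pyRange 2 (p + 1) 1).foldl (stepB (goB fuel) p)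
        (PySem.Int.floordiv (p * (p + 1)) 2, sp)
      (r.1, r.2.setdefault p r.1)

def primitives_alt (p : Int) (sp : List (Int × Int)) : Int :=
  (goB (p.toNat + 1) p (PySem.Dict.mk sp)).1

-- ===== PRECONDITION & SPEC =====
def Spec_primitives (p : Int) (sp : List (Int × Int)) (out : Int) : Prop := out = primitives_alt p sp
instance (p : Int) (sp : List (Int × Int)) (out : Int) : Decidable (Spec_primitives p sp out) := by unfold Spec_primitives; infer_instance

-- ===== CLAIM (what is proved, stated in full; the proofs are below) =====
def Claim_equal_primitives : Prop := ∀ (p : Int) (sp : List (Int × Int)), Dom_primitives p sp → Spec_primitives p sp (primitives p sp)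

-- ===== LEMMAS AND PROOFS =====

-- floor division by a positive divisor is antitone in the divisor (for a nonnegative dividend)
lemma fdiv_anti {m a b : Int} (hm : 0 ≤ m) (ha : 0 < a) (hab : a ≤ b) :
    PySem.Int.floordiv m b ≤ PySem.Int.floordiv m a := by
  have hb : (0:Int) < b := lt_of_lt_of_le ha hab
  have h1 : PySem.Int.floordiv m b * b ≤ m :=
    (PySem.Int.le_floordiv_iff_mul_le hb).mp le_rfl
  have h0 : 0 ≤ PySem.Int.floordiv m b :=
    (PySem.Int.le_floordiv_iff_mul_le hb).mpr (by simpa using hm)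
  rw [PySem.Int.le_floordiv_iff_mul_le ha]
  nlinarith

-- A's binary_search loop terminates within its fuel and its return value satisfies the
-- return guard, provided s is attained as m // d0 (which is how primitives calls it)
lemma bsLoop_returns (m s d0 : Int) (hs : 2 ≤ s) (hd0 : 0 < d0)
    (hd0s : PySem.Int.floordiv m d0 = s) (hm : 0 ≤ m) :
    ∀ (fuel : Nat) (upper lower : Int), 2 ≤ lower → lower < upper →
    s ≤ PySem.Int.floordiv m lower → PySem.Int.floordiv m (upper - 1) < s →
    (upper - lower).toNat ≤ fuel →
    PySem.Int.floordiv m (bsLoop m s fuel upper lower) < s ∧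
    PySem.Int.floordiv m (bsLoop m s fuel upper lower - 1) = s ∧
    lower < bsLoop m s fuel upper lower := by
  intro fuel
  induction fuel with
  | zero => intro upper lower h2 hlt hl hu hfuel; omega
  | succ f ih =>
    intro upper lower h2 hlt hl hu hfuel
    have hup2 : lower + 2 ≤ upper := by
      by_contra hc
      have he : upper = lower + 1 := by omega
      subst he
      have he2 : lower + 1 - 1 = lower := by ring
      rw [he2] at hu
      omega
    have hnlow : lower + 1 ≤ PySem.Int.floordiv (upper + lower) 2 := by
      rw [PySem.Int.le_floordiv_iff_mul_le (by norm_num)]; omega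
    have hnup : PySem.Int.floordiv (upper + lower) 2 < upper := by
      rw [PySem.Int.floordiv_lt_iff_lt_mul (by norm_num)]; omega
    simp only [bsLoop]
    set n := PySem.Int.floordiv (upper + lower) 2 with hndef
    split_ifs with hg hge hle
    · exact ⟨hg.1, hg.2, by omega⟩
    · obtain ⟨a, b, c⟩ := ih upper n (by omega) hnup hge hu (by omega)
      exact ⟨a, b, by omega⟩
    · have ht : PySem.Int.floordiv m n < s := by omega
      have hne : PySem.Int.floordiv m (n - 1) ≠ s := fun hh => hg ⟨ht, hh⟩
      have hlt2 : PySem.Int.floordiv m (n - 1) < s := by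
        rcases lt_or_gt_of_ne hne with h | h
        · exact h
        · exfalso
          have hnd0 : n ≤ d0 := by
            by_contra hc
            have := fdiv_anti hm hd0 (show d0 ≤ n - 1 by omega)
            omega
          have := fdiv_anti hm (show (0:Int) < n by omega) hnd0
          omega
      exact ih n lower h2 (by omega) hl hlt2 (by omega)
    · exfalso; omega

-- the block [d, binary_search p (p//d)) is exactly a constancy block of d ↦ p//d
lemma bs_block (p d : Int) (hd : 2 ≤ d) (hdp : d ≤ p) (hs : 2 ≤ PySem.Int.floordiv p d) :
    d < binary_search p (PySem.Int.floordiv p d) ∧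
    binary_search p (PySem.Int.floordiv p d) ≤ p + 1 ∧
    ∀ k, d ≤ k → k < binary_search p (PySem.Int.floordiv p d) →
      PySem.Int.floordiv p k = PySem.Int.floordiv p d := by
  have hd0 : (0:Int) < d := by omega
  have hm : (0:Int) ≤ p := by omega
  have hsd : PySem.Int.floordiv p d * d ≤ p :=
    (PySem.Int.le_floordiv_iff_mul_le hd0).mp le_rfl
  have hp4 : 4 ≤ p := by nlinarith
  have h1 : PySem.Int.floordiv p d ≤ PySem.Int.floordiv p 2 :=
    fdiv_anti hm (by norm_num) hd
  have hpm1 : PySem.Int.floordiv p (p - 1) = 1 :=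
    (PySem.Int.floordiv_eq_iff_of_pos (by omega)).mpr ⟨by omega, by omega⟩
  have hns : ¬ PySem.Int.floordiv p d ≤ 1 := by omega
  simp only [binary_search, if_neg hns]
  obtain ⟨g1, g2, g3⟩ := bsLoop_returns p (PySem.Int.floordiv p d) d hs hd0 rfl hm
    (p + 2).toNat p 2 le_rfl (by omega) h1 (by omega) (by omega)
  set dn := bsLoop p (PySem.Int.floordiv p d) (p + 2).toNat p 2 with hdn
  have hddn : d < dn := by
    by_contra hc
    have := fdiv_anti hm (show (0:Int) < dn by omega) (show dn ≤ d by omega)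
    omega
  have hdnm : PySem.Int.floordiv p (dn - 1) * (dn - 1) ≤ p :=
    (PySem.Int.le_floordiv_iff_mul_le (show (0:Int) < dn - 1 by omega)).mp le_rfl
  have hdnp : dn ≤ p + 1 := by nlinarith
  refine ⟨hddn, hdnp, fun k hk1 hk2 => ?_⟩
  have hA : PySem.Int.floordiv p k ≤ PySem.Int.floordiv p d := fdiv_anti hm hd0 hk1
  have hB : PySem.Int.floordiv p (dn - 1) ≤ PySem.Int.floordiv p k :=
    fdiv_anti hm (show (0:Int) < k by omega) (by omega)
  omega

-- B's inner loop does not touch dict entries at keys it never recurses on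
lemma getK_fold (f : Nat) (q k : Int) (l : List Int)
    (hrec : ∀ d ∈ l, ∀ (st : PySem.Dict Int Int),
      ((goB f (PySem.Int.floordiv q d) st).2).get? k = st.get? k) :
    ∀ (a : Int × PySem.Dict Int Int),
      ((l.foldl (stepB (goB f) q) a).2).get? k = (a.2).get? k := by
  induction l with
  | nil => intro a; simp
  | cons d t ih =>
    intro a
    simp only [List.foldl_cons]
    rw [ih (fun x hx st => hrec x (List.mem_cons_of_mem _ hx) st)]
    exact hrec d (List.mem_cons_self) a.2

-- a call at argument q leaves every dict entry at a key above q unchanged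
lemma getK_goB : ∀ (fuel : Nat) (q : Int) (st : PySem.Dict Int Int) (k : Int), q < k →
    ((goB fuel q st).2).get? k = st.get? k := by
  intro fuel
  induction fuel with
  | zero => intro q st k _; rfl
  | succ f ih =>
    intro q st k hk
    cases h : st.get? q with
    | some v => simp [goB, h]
    | none =>
      simp only [goB, h]
      rw [PySem.Dict.get?_setdefault_of_ne _ _ (show k ≠ q by omega)]
      apply getK_fold f q k
      intro d hd st'
      have hmem := PySem.List.mem_pyRange_one.mp hd
      have h1 : PySem.Int.floordiv q d ≤ PySem.Int.floordiv q 2 :=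
        fdiv_anti (by omega) (by norm_num) (by omega)
      have h2 : PySem.Int.floordiv q 2 < q := by
        rw [PySem.Int.floordiv_lt_iff_lt_mul (by norm_num)]; omega
      exact ih (PySem.Int.floordiv q d) st' k (by omega)

-- after a call at argument q (with positive fuel), the resulting dict memoizes the result at key q
lemma selfKey_goB (f : Nat) (q : Int) (st : PySem.Dict Int Int) :
    ((goB (f+1) q st).2).get? q = some ((goB (f+1) q st).1) := by
  cases h : st.get? q with
  | some v => simp [goB, h]
  | none =>
    simp only [goB, h]
    rw [PySem.Dict.get?_setdefault_self]
    have hnone : (((PySem.List.pyRange 2 (q + 1) 1).foldl (stepB (goB f) q)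
        (PySem.Int.floordiv (q * (q + 1)) 2, st)).2).get? q = none := by
      rw [getK_fold f q q]
      · exact h
      · intro d hd st'
        have hmem := PySem.List.mem_pyRange_one.mp hd
        have h1 : PySem.Int.floordiv q d ≤ PySem.Int.floordiv q 2 :=
          fdiv_anti (by omega) (by norm_num) (by omega)
        have h2 : PySem.Int.floordiv q 2 < q := by
          rw [PySem.Int.floordiv_lt_iff_lt_mul (by norm_num)]; omega
        exact getK_goB f (PySem.Int.floordiv q d) st' q (by omega)
    rw [hnone]
    rfl

-- a second call at the same argument is a memo hit: same value, dict unchanged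
lemma idem_goB (f : Nat) (q : Int) (st : PySem.Dict Int Int) :
    goB f q ((goB f q st).2) = goB f q st := by
  cases f with
  | zero => rfl
  | succ f =>
    have h := selfKey_goB f q st
    conv_lhs => rw [goB]
    rw [h]

-- B's loop over a run of divisors d with constant quotient p//d = s subtracts the
-- memoized value once per divisor
lemma seg_fold (f : Nat) (p s : Int) :
    ∀ (l : List Int), l ≠ [] → (∀ d ∈ l, PySem.Int.floordiv p d = s) →
    ∀ (acc : Int) (st : PySem.Dict Int Int),
      l.foldl (stepB (goB f) p) (acc, st) =
        (acc - (goB f s st).1 * l.length, (goB f s st).2) := by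
  intro l
  induction l with
  | nil => intro hne; exact absurd rfl hne
  | cons d t ih =>
    intro _ hall acc st
    simp only [List.foldl_cons, stepB]
    rw [hall d (List.mem_cons_self)]
    by_cases ht : t = []
    · subst ht
      simp
    · rw [ih ht (fun x hx => hall x (List.mem_cons_of_mem _ hx))]
      rw [idem_goB]
      simp only [List.length_cons, Prod.mk.injEq]
      refine ⟨?_, trivial⟩
      push_cast
      ring

-- A's block loop (with B substituted for the recursive call) equals B's flat loop
lemma loop_eq (f : Nat) (p : Int) :
    ∀ (w : Nat) (d acc : Int) (st : PySem.Dict Int Int), 2 ≤ d → d ≤ p + 1 →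
      (p + 1 - d).toNat ≤ w →
      whileA (goB f) p w d acc st =
        (PySem.List.pyRange d (p + 1) 1).foldl (stepB (goB f) p) (acc, st) := by
  intro w
  induction w with
  | zero =>
    intro d acc st h2 hdp hf
    have hdeq : d = p + 1 := by omega
    subst hdeq
    rw [PySem.List.pyRange_one_eq_nil le_rfl]
    rfl
  | succ w ih =>
    intro d acc st h2 hdp hf
    by_cases hd : d ≤ p
    · have hp2 : (2:Int) ≤ p := le_trans h2 hd
      have hm : (0:Int) ≤ p := by omega
      have hs1 : 1 ≤ PySem.Int.floordiv p d := by
        rw [PySem.Int.le_floordiv_iff_mul_le (by omega)]; omega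
      simp only [whileA, if_pos hd]
      by_cases hsle : PySem.Int.floordiv p d ≤ 1
      · have hbs : binary_search p (PySem.Int.floordiv p d) = p + 1 := by
          simp [binary_search, hsle]
        rw [hbs]
        rw [ih (p + 1) _ _ (by omega) le_rfl (by omega)]
        rw [PySem.List.pyRange_one_eq_nil le_rfl]
        simp only [List.foldl_nil]
        have hall : ∀ k ∈ PySem.List.pyRange d (p + 1) 1,
            PySem.Int.floordiv p k = PySem.Int.floordiv p d := by
          intro k hk
          have hmem := PySem.List.mem_pyRange_one.mp hk
          have hA : PySem.Int.floordiv p k ≤ PySem.Int.floordiv p d :=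
            fdiv_anti hm (by omega) hmem.1
          have hB : 1 ≤ PySem.Int.floordiv p k := by
            rw [PySem.Int.le_floordiv_iff_mul_le (by omega)]; omega
          omega
        rw [seg_fold f p (PySem.Int.floordiv p d) _ (by
          apply List.ne_nil_of_length_pos
          rw [PySem.List.length_pyRange_one]; omega) hall acc st]
        rw [PySem.List.length_pyRange_one,
          Int.toNat_of_nonneg (show (0:Int) ≤ p + 1 - d by omega)]
      · obtain ⟨hdn1, hdn2, hblock⟩ := bs_block p d h2 hd (by omega)
        have hall : ∀ k ∈ PySem.List.pyRange d (binary_search p (PySem.Int.floordiv p d)) 1,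
            PySem.Int.floordiv p k = PySem.Int.floordiv p d := by
          intro k hk
          have hmem := PySem.List.mem_pyRange_one.mp hk
          exact hblock k hmem.1 hmem.2
        rw [PySem.List.pyRange_one_append d (binary_search p (PySem.Int.floordiv p d)) (p + 1)
          (by omega) hdn2]
        rw [List.foldl_append]
        rw [seg_fold f p (PySem.Int.floordiv p d) _ (by
          apply List.ne_nil_of_length_pos
          rw [PySem.List.length_pyRange_one]; omega) hall acc st]
        rw [PySem.List.length_pyRange_one,
          Int.toNat_of_nonneg (show (0:Int) ≤ binary_search p (PySem.Int.floordiv p d) - d by omega)]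
        rw [ih (binary_search p (PySem.Int.floordiv p d)) _ _ (by omega) hdn2 (by omega)]
    · have hdeq : d = p + 1 := by omega
      subst hdeq
      rw [PySem.List.pyRange_one_eq_nil le_rfl]
      simp [whileA, hd]

lemma goA_eq_goB : ∀ (fuel : Nat) (p : Int) (st : PySem.Dict Int Int),
    goA fuel p st = goB fuel p st := by
  intro fuel
  induction fuel with
  | zero => intro p st; rfl
  | succ f ih =>
    intro p st
    have hfun : goA f = goB f := funext fun a => funext fun b => ih a b
    cases h : st.get? p with
    | some v => simp [goA, goB, h]
    | none =>
      simp only [goA, goB, h]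
      rw [hfun]
      by_cases hp : 1 ≤ p
      · rw [loop_eq f p (p.toNat + 1) 2 _ st (by norm_num) (by omega) (by omega)]
      · have h0 : p.toNat = 0 := by omega
        rw [h0]
        rw [PySem.List.pyRange_one_eq_nil (show p + 1 ≤ 2 by omega)]
        simp [whileA, show ¬ (2:Int) ≤ p by omega]

-- ===== VERDICT (by name: the statement is the Claim_ definition above) =====
theorem primitives_spec : Claim_equal_primitives := by
  intro p sp _
  unfold Spec_primitives primitives primitives_alt
  rw [goA_eq_goB]
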